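-- pv_equiv track=rewrite | github.com/Jasson-01/UBA-IP-2024 | Parciales_Python/Parcial-10-(2C-2024)/Turno Noche/Tests-python-tn/Solucion002.py | lista_de_divisores_primos
-- ===== SOURCE A (Python) =====
-- def es_primo(num02:int)->bool:
--     lista:list[int] = []
--     divisor:int = 1
--     while divisor <= num02:
--       if num02 % divisor == 0:
--          lista.append(divisor)
--       divisor += 1
--
--     if len(lista) > 2 or len(lista) == 1:
--         return False
--     return True
--
-- def divisores_de(num:int)->list[int]:
--     divisor:int = 2
--     lista_divisores:list[int] = []
--     while divisor <= num:
--         if num % divisor == 0: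
--            lista_divisores.append(divisor)
--         divisor += 1
--     return lista_divisores
--
-- def lista_de_divisores_primos(lista:list[int])->list[int]:
--     lista_nueva:list[int] = []
--     for i in range(len(lista)):
--         lista_de_divisores_comunes = divisores_de(lista[i])
--         for j in range(len(lista_de_divisores_comunes)):
--             if es_primo(lista_de_divisores_comunes[j]):
--                 lista_nueva.append(lista_de_divisores_comunes[j])
--
--     return lista_nueva
-- ===== SOURCE B (Python) =====
-- def lista_de_divisores_primos(lista):
--     res = []
--     for num in lista:
--         n = num
--         d = 2
--         while d * d <= n:
--             if n % d == 0:
--                 res.append(d)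
--                 while n % d == 0:
--                     n //= d
--             d += 1
--         if n > 1:
--             res.append(n)
--     return res
-- ===== Notes on version B (the rewrite author's own statement) =====
-- stated objective: faster
-- what changed: Replaces per-number enumeration of all divisors up to num followed by an O(d)-per-candidate primality test with trial-division factorization up to sqrt(num), dividing out each found prime factor.
import Mathlib
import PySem

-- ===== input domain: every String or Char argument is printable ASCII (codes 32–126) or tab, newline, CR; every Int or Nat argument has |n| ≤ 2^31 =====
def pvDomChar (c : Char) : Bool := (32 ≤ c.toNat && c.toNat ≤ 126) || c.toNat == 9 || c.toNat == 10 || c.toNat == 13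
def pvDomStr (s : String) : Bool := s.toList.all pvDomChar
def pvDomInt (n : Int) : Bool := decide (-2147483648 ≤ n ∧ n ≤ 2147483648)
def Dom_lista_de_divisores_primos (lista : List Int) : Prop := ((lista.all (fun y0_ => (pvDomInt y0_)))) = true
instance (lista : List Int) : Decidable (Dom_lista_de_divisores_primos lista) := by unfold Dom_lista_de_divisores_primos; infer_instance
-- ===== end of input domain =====

-- B replaces A's full divisor enumeration + list-counting primality test by trial-division
-- factorization up to sqrt(num) (objective: faster; measured).

-- ===== PORT A =====
-- shared loop body of es_primo and divisores_de:
-- 'while divisor <= num: if num % divisor == 0: lista.append(divisor); divisor += 1'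
-- structural recursion on a fuel that exactly counts the remaining iterations
def divAppendGo : Nat → Int → Int → List Int → List Int
  | 0, _, _, acc => acc
  | fuel + 1, num, divisor, acc =>
    if divisor ≤ num then
      divAppendGo fuel num (divisor + 1) (if num % divisor = 0 then acc ++ [divisor] else acc)
    else acc

def divAppend (num divisor : Int) (acc : List Int) : List Int :=
  divAppendGo (num + 1 - divisor).toNat num divisor acc

def es_primo (num02 : Int) : Bool :=
  let lista := divAppend num02 1 []
  if 2 < lista.length ∨ lista.length = 1 then false else true

def divisores_de (num : Int) : List Int := divAppend num 2 []

-- 'lista_de_divisores_comunes' is inlined as 'divisores_de lista[i]' below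
def lista_de_divisores_primos (lista : List Int) : List Int :=
  (PySem.List.pyRange 0 lista.length 1).foldl
    (fun acc i =>
      (PySem.List.pyRange 0 (divisores_de (PySem.List.pyGetD lista i 0)).length 1).foldl
        (fun acc2 j =>
          if es_primo (PySem.List.pyGetD (divisores_de (PySem.List.pyGetD lista i 0)) j 0) then
            acc2 ++ [PySem.List.pyGetD (divisores_de (PySem.List.pyGetD lista i 0)) j 0]
          else acc2) acc)
    []

-- ===== PORT B =====
-- 'while n % d == 0: n //= d'; the '0 < n ∧ 2 ≤ d' part of the guard is a totality guard only:
-- it holds at every reachable call (factorLoop calls it with 2 ≤ d and d * d ≤ n).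
def stripFactorGo : Nat → Int → Int → Int
  | 0, n, _ => n
  | fuel + 1, n, d =>
    if 0 < n ∧ 2 ≤ d ∧ n % d = 0 then stripFactorGo fuel (n / d) d else n

def stripFactor (n d : Int) : Int := stripFactorGo n.toNat n d

-- outer 'while d * d <= n' of B; '2 ≤ d' in the guard is a totality guard only: d starts at 2
-- and only increases.
def factorLoopGo : Nat → Int → Int → List Int → List Int
  | 0, n, _, acc => if 1 < n then acc ++ [n] else acc
  | fuel + 1, n, d, acc =>
    if 2 ≤ d ∧ d * d ≤ n then
      if n % d = 0 then factorLoopGo fuel (stripFactor n d) (d + 1) (acc ++ [d])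
      else factorLoopGo fuel n (d + 1) acc
    else if 1 < n then acc ++ [n] else acc

def factorLoop (n d : Int) (acc : List Int) : List Int :=
  factorLoopGo (n.toNat + (n - d).toNat) n d acc

def lista_de_divisores_primos_alt (lista : List Int) : List Int :=
  lista.foldl (fun acc num => factorLoop num 2 acc) []

-- ===== PRECONDITION & SPEC =====
def Spec_lista_de_divisores_primos (lista : List Int) (out : List Int) : Prop := out = lista_de_divisores_primos_alt lista
instance (lista : List Int) (out : List Int) : Decidable (Spec_lista_de_divisores_primos lista out) := by unfold Spec_lista_de_divisores_primos; infer_instance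

-- ===== CLAIM (what is proved, stated in full; the proofs are below) =====
def Claim_equal_lista_de_divisores_primos : Prop := ∀ (lista : List Int), Dom_lista_de_divisores_primos lista → Spec_lista_de_divisores_primos lista (lista_de_divisores_primos lista)

-- ===== LEMMAS AND PROOFS =====

-- ---- fuel machinery: any sufficient fuel computes the same value; unfold laws; induction ----

theorem stripFactorGo_eq : ∀ (fuel : Nat) (n d : Int), n.toNat ≤ fuel →
    stripFactorGo fuel n d = stripFactorGo n.toNat n d := by
  intro fuel
  induction fuel using Nat.strong_induction_on with
  | _ fuel ih =>
    match fuel with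
    | 0 => intro n d h; rw [show n.toNat = 0 by omega]
    | fuel + 1 =>
      intro n d h
      by_cases hg : 0 < n ∧ 2 ≤ d ∧ n % d = 0
      · have h1 : 0 < n / d :=
          Int.ediv_pos_of_pos_of_dvd hg.1 (by omega) (Int.dvd_of_emod_eq_zero hg.2.2)
        have h2 : n / d < n := by
          rw [Int.ediv_lt_iff_lt_mul (a := n) (b := n) (c := d) (by omega)]
          nlinarith [hg.1, hg.2.1]
        obtain ⟨m, hm⟩ : ∃ m, n.toNat = m + 1 := ⟨n.toNat - 1, by omega⟩
        rw [stripFactorGo, if_pos hg, hm, stripFactorGo, if_pos hg,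
          ih fuel (by omega) (n / d) d (by omega), ih m (by omega) (n / d) d (by omega)]
      · rcases Nat.eq_zero_or_eq_succ_pred n.toNat with hm | hm
        · rw [stripFactorGo, if_neg hg, hm, stripFactorGo]
        · rw [stripFactorGo, if_neg hg, hm, stripFactorGo, if_neg hg]

theorem stripFactor_unfold (n d : Int) :
    stripFactor n d = if 0 < n ∧ 2 ≤ d ∧ n % d = 0 then stripFactor (n / d) d else n := by
  unfold stripFactor
  by_cases hg : 0 < n ∧ 2 ≤ d ∧ n % d = 0
  · have h1 : 0 < n / d :=
      Int.ediv_pos_of_pos_of_dvd hg.1 (by omega) (Int.dvd_of_emod_eq_zero hg.2.2)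
    have h2 : n / d < n := by
      rw [Int.ediv_lt_iff_lt_mul (a := n) (b := n) (c := d) (by omega)]
      nlinarith [hg.1, hg.2.1]
    obtain ⟨m, hm⟩ : ∃ m, n.toNat = m + 1 := ⟨n.toNat - 1, by omega⟩
    rw [hm, stripFactorGo, if_pos hg, if_pos hg, stripFactorGo_eq m (n / d) d (by omega)]
  · rcases Nat.eq_zero_or_eq_succ_pred n.toNat with hm | hm
    · rw [hm, stripFactorGo, if_neg hg]
    · rw [hm, stripFactorGo, if_neg hg, if_neg hg]

theorem stripFactor_ind (d : Int) (motive : Int → Prop)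
    (case1 : ∀ n, (0 < n ∧ 2 ≤ d ∧ n % d = 0) → motive (n / d) → motive n)
    (case2 : ∀ n, ¬(0 < n ∧ 2 ≤ d ∧ n % d = 0) → motive n) : ∀ n, motive n := by
  suffices H : ∀ (fuel : Nat) (n : Int), n.toNat ≤ fuel → motive n from
    fun n => H n.toNat n le_rfl
  intro fuel
  induction fuel with
  | zero => intro n h; exact case2 n (by omega)
  | succ fuel ih =>
    intro n h
    by_cases hg : 0 < n ∧ 2 ≤ d ∧ n % d = 0
    · have h1 : 0 < n / d :=
        Int.ediv_pos_of_pos_of_dvd hg.1 (by omega) (Int.dvd_of_emod_eq_zero hg.2.2)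
      have h2 : n / d < n := by
        rw [Int.ediv_lt_iff_lt_mul (a := n) (b := n) (c := d) (by omega)]
        nlinarith [hg.1, hg.2.1]
      exact case1 n hg (ih (n / d) (by omega))
    · exact case2 n hg

theorem stripFactor_pos (n d : Int) (h : 0 < n) : 0 < stripFactor n d := by
  induction n using stripFactor_ind d with
  | case1 n hg ih =>
    rw [stripFactor_unfold, if_pos hg]
    exact ih (Int.ediv_pos_of_pos_of_dvd hg.1 (by omega) (Int.dvd_of_emod_eq_zero hg.2.2))
  | case2 n hg => rw [stripFactor_unfold, if_neg hg]; exact h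

theorem stripFactor_le (n d : Int) (h : 0 ≤ n) : stripFactor n d ≤ n := by
  induction n using stripFactor_ind d with
  | case1 n hg ih =>
    have h1 : 0 < n / d :=
      Int.ediv_pos_of_pos_of_dvd hg.1 (by omega) (Int.dvd_of_emod_eq_zero hg.2.2)
    have h2 : n / d < n := by
      rw [Int.ediv_lt_iff_lt_mul (a := n) (b := n) (c := d) (by omega)]
      nlinarith [hg.1, hg.2.1]
    rw [stripFactor_unfold, if_pos hg]
    have := ih (by omega); omega
  | case2 n hg => rw [stripFactor_unfold, if_neg hg]

-- the factor-loop measure decreases across both kinds of iteration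
theorem mu_decrease_A (n d : Int) (hg : 2 ≤ d ∧ d * d ≤ n) (hd : n % d = 0) :
    (stripFactor n d).toNat + (stripFactor n d - (d + 1)).toNat < n.toNat + (n - d).toNat := by
  have hn : 0 < n := by nlinarith [hg.1, hg.2]
  have hdvd : d ∣ n := Int.dvd_of_emod_eq_zero hd
  have hq : d * (n / d) = n := Int.mul_ediv_cancel' hdvd
  have hq0 : 0 < n / d := Int.ediv_pos_of_pos_of_dvd hn (by omega) hdvd
  have h2q : 2 * (n / d) ≤ n := by nlinarith [hg.1]
  have hle : stripFactor n d ≤ n / d := by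
    rw [stripFactor_unfold, if_pos ⟨hn, hg.1, hd⟩]
    exact stripFactor_le (n / d) d (by omega)
  have hpos : 0 < stripFactor n d := stripFactor_pos n d hn
  have hd2 : d + 2 ≤ n := by nlinarith [hg.1, hg.2]
  omega

theorem mu_decrease_B (n d : Int) (hg : 2 ≤ d ∧ d * d ≤ n) :
    n.toNat + (n - (d + 1)).toNat < n.toNat + (n - d).toNat := by
  have hd2 : d + 2 ≤ n := by nlinarith [hg.1, hg.2]
  omega

theorem factorLoopGo_eq : ∀ (fuel : Nat) (n d : Int) (acc : List Int),
    n.toNat + (n - d).toNat ≤ fuel →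
    factorLoopGo fuel n d acc = factorLoopGo (n.toNat + (n - d).toNat) n d acc := by
  intro fuel
  induction fuel using Nat.strong_induction_on with
  | _ fuel ih =>
    match fuel with
    | 0 => intro n d acc h; rw [show n.toNat + (n - d).toNat = 0 by omega]
    | fuel + 1 =>
      intro n d acc h
      by_cases hg : 2 ≤ d ∧ d * d ≤ n
      · obtain ⟨m, hm⟩ : ∃ m, n.toNat + (n - d).toNat = m + 1 := by
          have := mu_decrease_B n d hg
          exact ⟨n.toNat + (n - d).toNat - 1, by omega⟩
        by_cases hd : n % d = 0
        · have hlt := mu_decrease_A n d hg hd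
          rw [factorLoopGo, if_pos hg, if_pos hd, hm, factorLoopGo, if_pos hg, if_pos hd,
            ih fuel (by omega) _ _ _ (by omega), ih m (by omega) _ _ _ (by omega)]
        · have hlt := mu_decrease_B n d hg
          rw [factorLoopGo, if_pos hg, if_neg hd, hm, factorLoopGo, if_pos hg, if_neg hd,
            ih fuel (by omega) _ _ _ (by omega), ih m (by omega) _ _ _ (by omega)]
      · rcases Nat.eq_zero_or_eq_succ_pred (n.toNat + (n - d).toNat) with hm | hm
        · rw [factorLoopGo, if_neg hg, hm, factorLoopGo]
        · rw [factorLoopGo, if_neg hg, hm, factorLoopGo, if_neg hg]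

theorem factorLoop_unfold (n d : Int) (acc : List Int) :
    factorLoop n d acc =
      if 2 ≤ d ∧ d * d ≤ n then
        if n % d = 0 then factorLoop (stripFactor n d) (d + 1) (acc ++ [d])
        else factorLoop n (d + 1) acc
      else if 1 < n then acc ++ [n] else acc := by
  unfold factorLoop
  by_cases hg : 2 ≤ d ∧ d * d ≤ n
  · obtain ⟨m, hm⟩ : ∃ m, n.toNat + (n - d).toNat = m + 1 := by
      have := mu_decrease_B n d hg
      exact ⟨n.toNat + (n - d).toNat - 1, by omega⟩
    by_cases hd : n % d = 0
    · have hlt := mu_decrease_A n d hg hd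
      rw [hm, factorLoopGo, if_pos hg, if_pos hd, if_pos hg, if_pos hd,
        factorLoopGo_eq m _ _ _ (by omega)]
    · have hlt := mu_decrease_B n d hg
      rw [hm, factorLoopGo, if_pos hg, if_neg hd, if_pos hg, if_neg hd,
        factorLoopGo_eq m _ _ _ (by omega)]
  · rcases Nat.eq_zero_or_eq_succ_pred (n.toNat + (n - d).toNat) with hm | hm
    · rw [hm, factorLoopGo, if_neg hg]
    · rw [hm, factorLoopGo, if_neg hg, if_neg hg]

theorem factorLoop_ind (motive : Int → Int → List Int → Prop)
    (case1 : ∀ n d acc, (2 ≤ d ∧ d * d ≤ n) → n % d = 0 →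
      motive (stripFactor n d) (d + 1) (acc ++ [d]) → motive n d acc)
    (case2 : ∀ n d acc, (2 ≤ d ∧ d * d ≤ n) → ¬n % d = 0 →
      motive n (d + 1) acc → motive n d acc)
    (case3 : ∀ n d acc, ¬(2 ≤ d ∧ d * d ≤ n) → 1 < n → motive n d acc)
    (case4 : ∀ n d acc, ¬(2 ≤ d ∧ d * d ≤ n) → ¬1 < n → motive n d acc) :
    ∀ n d acc, motive n d acc := by
  suffices H : ∀ (fuel : Nat) (n d : Int) (acc : List Int),
      n.toNat + (n - d).toNat ≤ fuel → motive n d acc from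
    fun n d acc => H _ n d acc le_rfl
  intro fuel
  induction fuel with
  | zero =>
    intro n d acc h
    by_cases hg : 2 ≤ d ∧ d * d ≤ n
    · exact absurd h (by have := mu_decrease_B n d hg; omega)
    · by_cases h1 : 1 < n
      · exact case3 n d acc hg h1
      · exact case4 n d acc hg h1
  | succ fuel ih =>
    intro n d acc h
    by_cases hg : 2 ≤ d ∧ d * d ≤ n
    · by_cases hd : n % d = 0
      · exact case1 n d acc hg hd (ih _ _ _ (by have := mu_decrease_A n d hg hd; omega))
      · exact case2 n d acc hg hd (ih _ _ _ (by have := mu_decrease_B n d hg; omega))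
    · by_cases h1 : 1 < n
      · exact case3 n d acc hg h1
      · exact case4 n d acc hg h1

-- two strictly increasing lists with the same members are equal
theorem sortedMemEq : ∀ (l₁ l₂ : List Int), l₁.Pairwise (· < ·) → l₂.Pairwise (· < ·) →
    (∀ x, x ∈ l₁ ↔ x ∈ l₂) → l₁ = l₂ := by
  intro l₁
  induction l₁ with
  | nil =>
    intro l₂ _ _ hm
    cases l₂ with
    | nil => rfl
    | cons b t => exact absurd ((hm b).2 (List.mem_cons_self)) (by simp)
  | cons a t ih =>
    intro l₂ h1 h2 hm
    cases l₂ with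
    | nil => exact absurd ((hm a).1 (List.mem_cons_self)) (by simp)
    | cons b t₂ =>
      have hab : a = b := by
        rcases List.mem_cons.1 ((hm a).1 List.mem_cons_self) with h | h
        · exact h
        · rcases List.mem_cons.1 ((hm b).2 List.mem_cons_self) with h' | h'
          · exact h'.symm
          · exact absurd (lt_trans ((List.pairwise_cons.1 h2).1 a h)
              ((List.pairwise_cons.1 h1).1 b h')) (lt_irrefl b)
      subst hab
      have ht : t = t₂ := by
        apply ih t₂ (List.pairwise_cons.1 h1).2 (List.pairwise_cons.1 h2).2
        intro x
        constructor
        · intro hx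
          rcases List.mem_cons.1 ((hm x).1 (List.mem_cons_of_mem a hx)) with h | h
          · exact absurd ((List.pairwise_cons.1 h1).1 x hx) (by omega)
          · exact h
        · intro hx
          rcases List.mem_cons.1 ((hm x).2 (List.mem_cons_of_mem a hx)) with h | h
          · exact absurd ((List.pairwise_cons.1 h2).1 x hx) (by omega)
          · exact h
      rw [ht]

-- characterization of A's divisor loop
theorem divAppend_unfold (num k : Int) (acc : List Int) :
    divAppend num k acc =
      if k ≤ num then divAppend num (k + 1) (if num % k = 0 then acc ++ [k] else acc)
      else acc := by
  unfold divAppend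
  by_cases hk : k ≤ num
  · obtain ⟨m, hm⟩ : ∃ m, (num + 1 - k).toNat = m + 1 := ⟨(num + 1 - k).toNat - 1, by omega⟩
    rw [hm, divAppendGo, if_pos hk, if_pos hk, show (num + 1 - (k + 1)).toNat = m by omega]
  · rw [show (num + 1 - k).toNat = 0 by omega, divAppendGo, if_neg hk]

theorem divAppend_ind (num : Int) (motive : Int → List Int → Prop)
    (case1 : ∀ k acc, k ≤ num →
      motive (k + 1) (if num % k = 0 then acc ++ [k] else acc) → motive k acc)
    (case2 : ∀ k acc, ¬k ≤ num → motive k acc) : ∀ k acc, motive k acc := by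
  suffices H : ∀ (fuel : Nat) (k : Int) (acc : List Int),
      (num + 1 - k).toNat ≤ fuel → motive k acc from fun k acc => H _ k acc le_rfl
  intro fuel
  induction fuel with
  | zero => intro k acc h; exact case2 k acc (by omega)
  | succ fuel ih =>
    intro k acc h
    by_cases hk : k ≤ num
    · exact case1 k acc hk (ih (k + 1) _ (by omega))
    · exact case2 k acc hk

theorem divAppend_spec (num k : Int) (acc : List Int) :
    ∃ L, divAppend num k acc = acc ++ L ∧ L.Pairwise (· < ·) ∧
      (∀ p, p ∈ L ↔ (k ≤ p ∧ p ≤ num ∧ num % p = 0)) := by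
  induction k, acc using divAppend_ind num with
  | case1 k acc hk ih =>
    obtain ⟨L, hL, hp, hmem⟩ := ih
    by_cases h : num % k = 0 <;> simp only [h, if_pos, if_neg, dif_pos, dif_neg,
      not_false_iff] at hL
    · refine ⟨k :: L, ?_, ?_, ?_⟩
      · rw [divAppend_unfold, if_pos hk, if_pos h, hL]; simp
      · exact List.pairwise_cons.2 ⟨fun p hpm => by have := (hmem p).1 hpm; omega, hp⟩
      · intro p
        simp only [List.mem_cons, hmem p]
        constructor
        · rintro (rfl | ⟨h1, h2, h3⟩)
          · exact ⟨le_refl _, hk, h⟩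
          · exact ⟨by omega, h2, h3⟩
        · rintro ⟨h1, h2, h3⟩
          rcases eq_or_lt_of_le h1 with rfl | hlt
          · exact Or.inl rfl
          · exact Or.inr ⟨by omega, h2, h3⟩
    · refine ⟨L, ?_, hp, ?_⟩
      · rw [divAppend_unfold, if_pos hk, if_neg h, hL]
      · intro p
        rw [hmem p]
        constructor
        · rintro ⟨h1, h2, h3⟩; exact ⟨by omega, h2, h3⟩
        · rintro ⟨h1, h2, h3⟩
          rcases eq_or_lt_of_le h1 with rfl | hlt
          · exact absurd h3 h
          · exact ⟨by omega, h2, h3⟩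
  | case2 k acc hk =>
    refine ⟨[], by rw [divAppend_unfold, if_neg hk]; simp, by simp, ?_⟩
    intro p; simp only [List.not_mem_nil, false_iff]
    rintro ⟨h1, h2, _⟩; omega

-- bridges between Mathlib's Prime on ℤ and the 'only divisors 1 and n' reading
theorem int_divisor_of_prime (n m : Int) (hn : 2 ≤ n) (hp : Prime n) (hm : 1 ≤ m) (hd : m ∣ n) :
    m = 1 ∨ m = n := by
  have h1 : m.natAbs ∣ n.natAbs := Int.natAbs_dvd_natAbs.2 hd
  have h2 : Nat.Prime n.natAbs := Int.prime_iff_natAbs_prime.1 hp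
  rcases (Nat.Prime.eq_one_or_self_of_dvd h2 _ h1) with h | h <;> omega

theorem int_prime_of_divisors (n : Int) (hn : 2 ≤ n)
    (h : ∀ m : Int, 1 ≤ m → m ∣ n → m = 1 ∨ m = n) : Prime n := by
  rw [Int.prime_iff_natAbs_prime, Nat.prime_def_lt]
  refine ⟨by omega, fun m hm hdvd => ?_⟩
  have h0 : (0:Nat) < m := by
    rcases Nat.eq_zero_or_pos m with rfl | h'
    · simp at hdvd; omega
    · exact h'
  have hmi : (m:Int) ∣ n := by
    have := Int.natCast_dvd_natCast.2 hdvd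
    simpa [Int.natAbs_of_nonneg (by omega : (0:Int) ≤ n)] using this
  rcases h m (by omega) hmi with h' | h' <;> omega

theorem es_primo_iff (n : Int) (hn : 2 ≤ n) : es_primo n = true ↔ Prime n := by
  obtain ⟨L, hL, hp, hmem⟩ := divAppend_spec n 1 []
  have h1 : (1:Int) ∈ L := (hmem 1).2 ⟨le_refl _, by omega, Int.emod_one n⟩
  have h2 : n ∈ L := (hmem n).2 ⟨by omega, le_refl _, Int.emod_self⟩
  have hes : es_primo n = true ↔ L.length = 2 := by
    unfold es_primo
    simp only [hL, List.nil_append]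
    have hlen : L.length ≠ 0 := by
      intro h0; rw [List.length_eq_zero_iff] at h0; subst h0; simp at h1
    split_ifs with h
    · simp only [false_iff]; omega
    · simp only [true_iff]
      rcases not_or.1 h with ⟨ha, hb⟩; omega
  rw [hes]
  constructor
  · intro hlen
    obtain ⟨a, b, rfl⟩ := List.length_eq_two.1 hlen
    have hab : a < b := by
      have := List.pairwise_cons.1 hp
      exact this.1 b (by simp)
    have hma := (hmem a).1 (by simp)
    have hmb := (hmem b).1 (by simp)
    have h1' : 1 = a ∨ 1 = b := by simpa using h1
    have h2' : n = a ∨ n = b := by simpa using h2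
    have ha1 : a = 1 := by omega
    have hbn : b = n := by omega
    apply int_prime_of_divisors n hn
    intro m hm hd
    have hmm : m ∈ [a, b] := (hmem m).2
      ⟨hm, Int.le_of_dvd (by omega) hd, Int.emod_eq_zero_of_dvd hd⟩
    simp only [List.mem_cons, List.not_mem_nil, or_false, List.mem_singleton] at hmm
    omega
  · intro hpr
    have hL2 : L = [1, n] := by
      apply sortedMemEq L [1, n] hp
      · simp only [List.pairwise_cons]
        exact ⟨by intro b hb; simp at hb; omega, by simp⟩
      · intro x
        constructor
        · intro hx
          have := (hmem x).1 hx
          have := int_divisor_of_prime n x hn hpr this.1 (Int.dvd_of_emod_eq_zero this.2.2)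
          simpa using this
        · intro hx
          simp only [List.mem_cons, List.not_mem_nil, or_false, List.mem_singleton] at hx
          rcases hx with rfl | rfl
          · exact h1
          · exact h2
    rw [hL2]; rfl

-- stripFactor algebra
theorem stripFactor_dvd (n d : Int) : stripFactor n d ∣ n := by
  induction n using stripFactor_ind d with
  | case1 n hg ih =>
    rw [stripFactor_unfold, if_pos hg]
    have hdvd : d ∣ n := Int.dvd_of_emod_eq_zero hg.2.2
    obtain ⟨k, rfl⟩ := hdvd
    have hk : d * k / d = k := Int.mul_ediv_cancel_left k (by omega)
    rw [hk] at ih ⊢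
    exact ih.trans (Dvd.intro_left d rfl)
  | case2 n hg => rw [stripFactor_unfold, if_neg hg]

theorem stripFactor_not_dvd (n d : Int) (h : 0 < n) (hd : 2 ≤ d) : ¬ d ∣ stripFactor n d := by
  induction n using stripFactor_ind d with
  | case1 n hg ih =>
    rw [stripFactor_unfold, if_pos hg]
    exact ih (Int.ediv_pos_of_pos_of_dvd hg.1 (by omega) (Int.dvd_of_emod_eq_zero hg.2.2))
  | case2 n hg =>
    rw [stripFactor_unfold, if_neg hg]
    intro hdvd
    exact hg ⟨h, hd, Int.emod_eq_zero_of_dvd hdvd⟩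

theorem stripFactor_prime_dvd_iff (n d p : Int) (h : 0 < n) (hd : 2 ≤ d) (hdp : Prime d)
    (hp2 : 2 ≤ p) (hp : Prime p) (hne : p ≠ d) : p ∣ stripFactor n d ↔ p ∣ n := by
  induction n using stripFactor_ind d with
  | case1 n hg ih =>
    rw [stripFactor_unfold, if_pos hg]
    have hdvd : d ∣ n := Int.dvd_of_emod_eq_zero hg.2.2
    have hpos : 0 < n / d := Int.ediv_pos_of_pos_of_dvd hg.1 (by omega) hdvd
    rw [ih hpos]
    constructor
    · intro hx
      exact hx.trans (Int.ediv_dvd_of_dvd hdvd)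
    · intro hx
      have hmul : n = d * (n / d) := by
        rw [mul_comm]; exact (Int.ediv_mul_cancel hdvd).symm
      rw [hmul] at hx
      rcases hp.2.2 _ _ hx with hpd | hq
      · rcases int_divisor_of_prime d p hd hdp (by omega) hpd with h1 | h1 <;> omega
      · exact hq
  | case2 n hg => rw [stripFactor_unfold, if_neg hg]

-- the factorization loop produces exactly the increasing list of (positive) prime divisors
theorem factorLoop_spec : ∀ (n d : Int) (acc : List Int), 1 ≤ n → 2 ≤ d →
    (∀ e : Int, 2 ≤ e → e < d → ¬ e ∣ n) →
    ∃ L, factorLoop n d acc = acc ++ L ∧ L.Pairwise (· < ·) ∧ (∀ e ∈ L, d ≤ e) ∧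
      (∀ p, p ∈ L ↔ (2 ≤ p ∧ Prime p ∧ p ∣ n)) := by
  intro n d acc
  induction n, d, acc using factorLoop_ind with
  | case1 n d acc h hd ih =>
    intro h1 h2 hinv
    have hn : 0 < n := by omega
    have hdvd : d ∣ n := Int.dvd_of_emod_eq_zero hd
    have hdp : Prime d := by
      apply int_prime_of_divisors d h.1
      intro m hm hmd
      by_contra hcon
      push_neg at hcon
      have hmle : m ≤ d := Int.le_of_dvd (by omega) hmd
      exact hinv m (by omega) (by omega) (hmd.trans hdvd)
    have hn' : 0 < stripFactor n d := stripFactor_pos n d hn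
    have hinv' : ∀ e : Int, 2 ≤ e → e < d + 1 → ¬ e ∣ stripFactor n d := by
      intro e he hlt hdvd'
      rcases eq_or_lt_of_le (by omega : e ≤ d) with rfl | hltd
      · exact stripFactor_not_dvd n e hn he hdvd'
      · exact hinv e he hltd (hdvd'.trans (stripFactor_dvd n d))
    obtain ⟨L', hL', hp', hlb', hmem'⟩ := ih (by omega) (by omega) hinv'
    refine ⟨d :: L', ?_, ?_, ?_, ?_⟩
    · rw [factorLoop_unfold, if_pos h, if_pos hd, hL']; simp
    · exact List.pairwise_cons.2 ⟨fun e he => by have := hlb' e he; omega, hp'⟩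
    · intro e he
      rcases List.mem_cons.1 he with rfl | he'
      · exact le_refl _
      · have := hlb' e he'; omega
    · intro p
      simp only [List.mem_cons, hmem' p]
      constructor
      · rintro (rfl | ⟨hp2, hppr, hpd⟩)
        · exact ⟨h.1, hdp, hdvd⟩
        · exact ⟨hp2, hppr, hpd.trans (stripFactor_dvd n d)⟩
      · rintro ⟨hp2, hppr, hpdn⟩
        by_cases hpe : p = d
        · exact Or.inl hpe
        · exact Or.inr ⟨hp2, hppr,
            (stripFactor_prime_dvd_iff n d p hn h.1 hdp hp2 hppr hpe).2 hpdn⟩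
  | case2 n d acc h hd ih =>
    intro h1 h2 hinv
    have hinv' : ∀ e : Int, 2 ≤ e → e < d + 1 → ¬ e ∣ n := by
      intro e he hlt hdvd'
      rcases eq_or_lt_of_le (by omega : e ≤ d) with rfl | hltd
      · exact hd (Int.emod_eq_zero_of_dvd hdvd')
      · exact hinv e he hltd hdvd'
    obtain ⟨L', hL', hp', hlb', hmem'⟩ := ih h1 (by omega) hinv'
    refine ⟨L', by rw [factorLoop_unfold, if_pos h, if_neg hd]; exact hL', hp',
      fun e he => by have := hlb' e he; omega, hmem'⟩
  | case3 n d acc h h1n =>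
    intro h1 h2 hinv
    have hdd : n < d * d := by
      rcases not_and_or.1 h with hc | hc
      · omega
      · omega
    have hnp : Prime n := by
      apply int_prime_of_divisors n (by omega)
      intro m hm hmd
      by_contra hcon
      push_neg at hcon
      have hm2 : 2 ≤ m := by
        rcases eq_or_lt_of_le hm with rfl | h' <;> omega
      have hmlt : m < n := by
        have := Int.le_of_dvd (by omega) hmd
        omega
      obtain ⟨f, hf⟩ := hmd
      have hf1 : 1 ≤ f := by nlinarith
      have hf2 : 2 ≤ f := by
        rcases eq_or_lt_of_le hf1 with rfl | h' <;> omega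
      by_cases hmd' : m < d
      · exact hinv m hm2 hmd' ⟨f, hf⟩
      · have hflt : f < d := by nlinarith
        exact hinv f hf2 hflt ⟨m, by rw [hf]; ring⟩
    have hdn : d ≤ n := by
      by_contra hcon
      push_neg at hcon
      exact hinv n (by omega) (by omega) dvd_rfl
    refine ⟨[n], by rw [factorLoop_unfold, if_neg h, if_pos h1n], by simp, by simpa using hdn, ?_⟩
    intro p
    simp only [List.mem_cons, List.not_mem_nil, or_false]
    constructor
    · rintro rfl
      exact ⟨by omega, hnp, dvd_rfl⟩
    · rintro ⟨hp2, hppr, hpd⟩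
      rcases int_divisor_of_prime n p (by omega) hnp (by omega) hpd with h' | h' <;> omega
  | case4 n d acc h h1n =>
    intro h1 h2 hinv
    refine ⟨[], by rw [factorLoop_unfold, if_neg h, if_neg h1n]; simp, by simp, by simp, ?_⟩
    intro p
    simp only [List.not_mem_nil, false_iff]
    rintro ⟨hp2, _, hpd⟩
    have hn1 : n = 1 := by omega
    subst hn1
    have := Int.le_of_dvd one_pos hpd
    omega

-- per-number equality of the two pipelines
theorem perNum (num : Int) : (divisores_de num).filter es_primo = factorLoop num 2 [] := by
  by_cases hnum : 2 ≤ num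
  · obtain ⟨L, hL, hp, hmem⟩ := divAppend_spec num 2 []
    obtain ⟨L2, hL2, hp2, _, hmem2⟩ := factorLoop_spec num 2 [] (by omega) (by omega)
      (fun e he hlt => by omega)
    rw [show divisores_de num = L by rw [divisores_de, hL]; simp, hL2]
    simp only [List.nil_append]
    apply sortedMemEq _ _ (hp.filter _) hp2
    intro x
    rw [List.mem_filter, hmem x, hmem2 x]
    constructor
    · rintro ⟨⟨hx2, hxn, hxm⟩, hes⟩
      exact ⟨hx2, (es_primo_iff x hx2).1 hes, Int.dvd_of_emod_eq_zero hxm⟩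
    · rintro ⟨hx2, hpr, hdvd⟩
      exact ⟨⟨hx2, Int.le_of_dvd (by omega) hdvd, Int.emod_eq_zero_of_dvd hdvd⟩,
        (es_primo_iff x hx2).2 hpr⟩
  · obtain ⟨L, hL, hp, hmem⟩ := divAppend_spec num 2 []
    have hLnil : L = [] :=
      List.eq_nil_iff_forall_not_mem.2 (fun x hx => by have := (hmem x).1 hx; omega)
    have hA : divisores_de num = [] := by rw [divisores_de, hL, hLnil]; simp
    have hB : factorLoop num 2 [] = [] := by
      rw [factorLoop_unfold, if_neg (by omega : ¬((2:Int) ≤ 2 ∧ 2 * 2 ≤ num)), if_neg (by omega)]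
    rw [hA, hB]; rfl

theorem factorLoop_acc (num : Int) (acc : List Int) :
    factorLoop num 2 acc = acc ++ factorLoop num 2 [] := by
  by_cases hnum : 2 ≤ num
  · obtain ⟨L1, hL1, hp1, _, hmem1⟩ := factorLoop_spec num 2 acc (by omega) (by omega)
      (fun e he hlt => by omega)
    obtain ⟨L2, hL2, hp2, _, hmem2⟩ := factorLoop_spec num 2 [] (by omega) (by omega)
      (fun e he hlt => by omega)
    have hEq : L1 = L2 := sortedMemEq _ _ hp1 hp2 (fun x => (hmem1 x).trans (hmem2 x).symm)
    rw [hL1, hL2, hEq]; simp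
  · have hg : ¬((2:Int) ≤ 2 ∧ 2 * 2 ≤ num) := by omega
    have h1 : ¬(1:Int) < num := by omega
    rw [factorLoop_unfold, if_neg hg, if_neg h1, factorLoop_unfold, if_neg hg, if_neg h1]
    simp

-- B's outer fold, extracted
theorem foldlB (lista : List Int) : ∀ acc : List Int,
    lista.foldl (fun acc num => factorLoop num 2 acc) acc =
      acc ++ lista.flatMap (fun n => factorLoop n 2 []) := by
  induction lista with
  | nil => intro acc; simp
  | cons a t ih =>
    intro acc
    simp only [List.foldl_cons, List.flatMap_cons]
    rw [factorLoop_acc, ih]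
    simp

-- ===== VERDICT (by name: the statement is the Claim_ definition above) =====
theorem foldlA (lista : List Int) : ∀ acc : List Int,
    lista.foldl
      (fun acc x =>
        (PySem.List.pyRange 0 ((divisores_de x).length : Int) 1).foldl
          (fun acc2 j =>
            if es_primo (PySem.List.pyGetD (divisores_de x) j 0) then
              acc2 ++ [PySem.List.pyGetD (divisores_de x) j 0]
            else acc2) acc) acc =
      acc ++ lista.flatMap (fun x => (divisores_de x).filter es_primo) := by
  induction lista with
  | nil => intro acc; simp
  | cons a t ih =>
    intro acc
    simp only [List.foldl_cons, List.flatMap_cons]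
    rw [PySem.List.foldl_pyRange_zero_pyGetD' (divisores_de a) 0
      (fun acc2 x => if es_primo x then acc2 ++ [x] else acc2) acc,
      PySem.List.foldl_append_if_eq_filter, ih]
    simp

theorem lista_de_divisores_primos_spec : Claim_equal_lista_de_divisores_primos := by
  intro lista _
  unfold Spec_lista_de_divisores_primos lista_de_divisores_primos lista_de_divisores_primos_alt
  rw [PySem.List.foldl_pyRange_zero_pyGetD' lista 0
    (fun acc x => (PySem.List.pyRange 0 ((divisores_de x).length : Int) 1).foldl
      (fun acc2 j =>
        if es_primo (PySem.List.pyGetD (divisores_de x) j 0) then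
          acc2 ++ [PySem.List.pyGetD (divisores_de x) j 0]
        else acc2) acc) []]
  rw [foldlA, foldlB]
  simp only [List.nil_append]
  rw [show (fun x => (divisores_de x).filter es_primo) = (fun n => factorLoop n 2 [])
    from funext perNum]
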